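-- pv_equiv track=rewrite | github.com/aelronatline5/agent-bash-parsing | readonly_bash_hook/parser.py | preparse_strip_time
-- ===== SOURCE A (Python) =====
-- def preparse_strip_time(cmd: str) -> str:
--     """Strip the ``time`` keyword and its flags from the front of *cmd*."""
--     stripped = cmd.lstrip()
--     if not stripped.startswith("time"):
--         return cmd
--
--     # Make sure it's the keyword, not e.g. "timeout"
--     rest = stripped[4:]
--     if rest and rest[0] not in (" ", "\t", "\n", ";", "|", "&"):  # pragma: no cover
--         return cmd
--
--     rest = rest.lstrip()
--
--     # Consume flags: -p, --
--     while rest: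
--         if rest.startswith("-p") and (len(rest) == 2 or rest[2] in " \t\n"):
--             rest = rest[2:].lstrip()
--         elif rest.startswith("--") and (len(rest) == 2 or rest[2] in " \t\n"):  # pragma: no cover
--             rest = rest[2:].lstrip()
--             break
--         else:
--             break
--
--     return rest
-- ===== SOURCE B (Python) =====
-- def _skip_ws(s: str, i: int) -> int:
--     while i < len(s) and s[i].isspace():
--         i += 1
--     return i
--
--
-- def preparse_strip_time(cmd: str) -> str:
--     """Strip the ``time`` keyword and its flags from the front of *cmd*."""
--     s = cmd.lstrip()
--     if not (s[:4] == "time" and (len(s) == 4 or s[4] in " \t\n;|&")):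
--         return cmd
--     i = _skip_ws(s, 4)
--     while s[i:i + 2] == "-p" and (i + 2 == len(s) or s[i + 2] in " \t\n"):
--         i = _skip_ws(s, i + 2)
--     if s[i:i + 2] == "--" and (i + 2 == len(s) or s[i + 2] in " \t\n"):
--         i = _skip_ws(s, i + 2)
--     return s[i:]
-- ===== Notes on version B (the rewrite author's own statement) =====
-- stated objective: alternative
-- what changed: Replaces A's repeated string slicing and re-lstripping of a shrinking 'rest' string with a single index-based scan over the lstripped command: a whitespace-skipping cursor advances past 'time', a run of '-p' flags and one optional '--', and the result is one final slice.
import Mathlib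
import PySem

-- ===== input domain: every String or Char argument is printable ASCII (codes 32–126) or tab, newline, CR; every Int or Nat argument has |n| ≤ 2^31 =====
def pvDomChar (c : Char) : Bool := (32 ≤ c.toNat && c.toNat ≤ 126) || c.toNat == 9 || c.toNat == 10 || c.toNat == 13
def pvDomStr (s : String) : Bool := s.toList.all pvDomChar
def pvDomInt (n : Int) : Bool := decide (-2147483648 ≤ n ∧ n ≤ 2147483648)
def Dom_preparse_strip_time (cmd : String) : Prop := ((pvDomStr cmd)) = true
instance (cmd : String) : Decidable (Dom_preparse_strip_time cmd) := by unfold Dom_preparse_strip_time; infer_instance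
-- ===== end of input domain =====

-- B replaces A's repeated slicing/re-lstripping of a shrinking `rest` string by a single
-- index-based cursor scan over the lstripped command (alternative decomposition, same cost class).

-- separator set after the `time` keyword (A: `rest[0] not in (" ", "\t", "\n", ";", "|", "&")`)
def pvTimeSeps : List Char := [' ', '\t', '\n', ';', '|', '&']
-- whitespace set bounding a flag (A: `rest[2] in " \t\n"`)
def pvFlagWs : List Char := [' ', '\t', '\n']

-- ===== PORT A =====
-- length of lstrip (= dropWhile isspace) never grows: cited by pvALoop's termination proof
theorem pvLstripLen (l : List Char) : (PySem.Chars.lstrip l).length ≤ l.length := by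
  show (l.dropWhile PySem.Chars.isspace).length ≤ l.length
  exact List.length_dropWhile_le _ _

-- A's `while rest:` loop, carrying the shrinking string `rest`
def pvALoop (rest : List Char) : List Char :=
  if rest = [] then rest
  else if PySem.Chars.startswith rest ['-', 'p'] = true ∧
      (rest.length = 2 ∨ (PySem.List.pyGet? rest 2).any (pvFlagWs.contains ·) = true) then
    pvALoop (PySem.Chars.lstrip (PySem.List.slice rest (some 2) none))
  else if PySem.Chars.startswith rest ['-', '-'] = true ∧
      (rest.length = 2 ∨ (PySem.List.pyGet? rest 2).any (pvFlagWs.contains ·) = true) then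
    PySem.Chars.lstrip (PySem.List.slice rest (some 2) none)
  else rest
termination_by rest.length
decreasing_by
  rename_i hne _
  have ht2 : (2 : Int).toNat = 2 := by decide
  have h2 : PySem.List.slice rest (some 2) none = rest.drop 2 := by
    rw [PySem.List.slice_from rest (by norm_num), ht2]
  calc (PySem.Chars.lstrip (PySem.List.slice rest (some 2) none)).length
      ≤ (PySem.List.slice rest (some 2) none).length := pvLstripLen _
    _ = rest.length - 2 := by rw [h2]; simp
    _ < rest.length := by
        have : rest.length ≠ 0 := by simpa using hne
        omega

def preparse_strip_time (cmd : String) : String :=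
  let stripped := PySem.Chars.lstrip cmd.toList
  if PySem.Chars.startswith stripped ['t', 'i', 'm', 'e'] = false then cmd
  else
    let rest := PySem.List.slice stripped (some 4) none
    if rest ≠ [] ∧ (PySem.List.pyGet? rest 0).any (pvTimeSeps.contains ·) = false then cmd
    else String.ofList (pvALoop (PySem.Chars.lstrip rest))

-- ===== PORT B =====
-- `_skip_ws(s, i)`: advance the cursor past whitespace
def pvSkipWs (s : List Char) (i : Nat) : Nat :=
  if i < s.length ∧ (s[i]?).any PySem.Chars.isspace = true then pvSkipWs s (i + 1) else i
termination_by s.length - i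
decreasing_by rename_i h; omega

-- the cursor never moves backwards and never leaves the string: cited by pvBLoop's termination proof
theorem pvSkipWsGe (s : List Char) (i : Nat) : i ≤ pvSkipWs s i ∧ pvSkipWs s i ≤ max s.length i := by
  fun_induction pvSkipWs s i with
  | case1 i h ih => omega
  | case2 i h => omega

-- B's `while` over the cursor: consume a run of `-p` flags
def pvBLoop (s : List Char) (i : Nat) : Nat :=
  if h : (s.drop i).take 2 = ['-', 'p'] ∧
      (i + 2 = s.length ∨ (s[i + 2]?).any (pvFlagWs.contains ·) = true) then
    pvBLoop s (pvSkipWs s (i + 2))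
  else i
termination_by s.length - i
decreasing_by
  have hl := congrArg List.length h.1
  simp only [List.length_take, List.length_drop, List.length_cons, List.length_nil] at hl
  have := pvSkipWsGe s (i + 2)
  omega

def preparse_strip_time_alt (cmd : String) : String :=
  let s := PySem.Chars.lstrip cmd.toList
  if s.take 4 = ['t', 'i', 'm', 'e'] ∧
      (s.length = 4 ∨ (s[4]?).any (pvTimeSeps.contains ·) = true) then
    let i0 := pvBLoop s (pvSkipWs s 4)
    let i1 := if (s.drop i0).take 2 = ['-', '-'] ∧
        (i0 + 2 = s.length ∨ (s[i0 + 2]?).any (pvFlagWs.contains ·) = true)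
      then pvSkipWs s (i0 + 2) else i0
    String.ofList (s.drop i1)
  else cmd

-- ===== PRECONDITION & SPEC =====
def Spec_preparse_strip_time (cmd : String) (out : String) : Prop := out = preparse_strip_time_alt cmd
instance (cmd : String) (out : String) : Decidable (Spec_preparse_strip_time cmd out) := by unfold Spec_preparse_strip_time; infer_instance

-- ===== CLAIM (what is proved, stated in full; the proofs are below) =====
def Claim_equal_preparse_strip_time : Prop := ∀ (cmd : String), Dom_preparse_strip_time cmd → Spec_preparse_strip_time cmd (preparse_strip_time cmd)

-- ===== LEMMAS AND PROOFS =====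

theorem pvLstripDropWhile (l : List Char) :
    PySem.Chars.lstrip l = l.dropWhile PySem.Chars.isspace := rfl

-- lstripping a suffix = moving the cursor with pvSkipWs
theorem pvLstripDrop (s : List Char) (i : Nat) :
    PySem.Chars.lstrip (s.drop i) = s.drop (pvSkipWs s i) := by
  fun_induction pvSkipWs s i with
  | case1 i h ih =>
    have hsp : PySem.Chars.isspace s[i] = true := by
      have h2 := h.2
      rwa [List.getElem?_eq_getElem h.1, Option.any_some] at h2
    rw [← ih, pvLstripDropWhile, pvLstripDropWhile,
        List.drop_eq_getElem_cons h.1, List.dropWhile_cons_of_pos hsp]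
  | case2 i h =>
    rcases Nat.lt_or_ge i s.length with hi | hi
    · have hsp : ¬ PySem.Chars.isspace s[i] = true := by
        intro hc
        exact h ⟨hi, by rw [List.getElem?_eq_getElem hi, Option.any_some]; exact hc⟩
      rw [pvLstripDropWhile, List.drop_eq_getElem_cons hi, List.dropWhile_cons_of_neg hsp]
    · rw [List.drop_eq_nil_of_le hi]; rfl

-- translation of A's flag condition (on `rest = s.drop i`) into B's cursor condition
theorem pvCondIff (s : List Char) (i : Nat) (c : Char) (hi : i ≤ s.length) :
    (PySem.Chars.startswith (s.drop i) ['-', c] = true ∧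
      ((s.drop i).length = 2 ∨ (PySem.List.pyGet? (s.drop i) 2).any (pvFlagWs.contains ·) = true))
    ↔ ((s.drop i).take 2 = ['-', c] ∧
      (i + 2 = s.length ∨ (s[i + 2]?).any (pvFlagWs.contains ·) = true)) := by
  have hsw : PySem.Chars.startswith (s.drop i) ['-', c] = true ↔ (s.drop i).take 2 = ['-', c] := by
    rw [PySem.Chars.startswith_iff, List.prefix_iff_eq_take]
    simp [eq_comm]
  have hlen : (s.drop i).length = 2 ↔ i + 2 = s.length := by
    simp only [List.length_drop]; omega
  have hget : PySem.List.pyGet? (s.drop i) 2 = s[i + 2]? := by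
    have h1 := PySem.List.pyGet?_natCast (s.drop i) 2
    simp only [Nat.cast_ofNat] at h1
    rw [h1, List.getElem?_drop]
  rw [hsw, hlen, hget]

-- MAIN LEMMA: A's slicing loop computes the suffix at B's final cursor
theorem pvLoopEq (s : List Char) (i : Nat) (hi : i ≤ s.length) :
    pvALoop (s.drop i) =
      s.drop (if (s.drop (pvBLoop s i)).take 2 = ['-', '-'] ∧
          (pvBLoop s i + 2 = s.length ∨ (s[pvBLoop s i + 2]?).any (pvFlagWs.contains ·) = true)
        then pvSkipWs s (pvBLoop s i + 2) else pvBLoop s i) := by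
  have hslice : ∀ j : Nat, PySem.List.slice (s.drop j) (some 2) none = s.drop (j + 2) := by
    intro j
    rw [PySem.List.slice_from _ (by norm_num), List.drop_drop]
    try congr 1
    try omega
  fun_induction pvBLoop s i with
  | case1 i h ih =>
    have hl := congrArg List.length h.1
    simp only [List.length_take, List.length_drop, List.length_cons, List.length_nil] at hl
    have hi2 : i + 2 ≤ s.length := by omega
    have hne : s.drop i ≠ [] := by
      intro hnil
      rw [hnil] at h
      simp at h
    have hcp := (pvCondIff s i 'p' hi).mpr h
    rw [pvALoop, if_neg hne, if_pos hcp, hslice, pvLstripDrop]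
    exact ih (le_trans (pvSkipWsGe s (i + 2)).2 (by omega))
  | case2 i h =>
    by_cases hnil : s.drop i = []
    · have hc : ¬ ((s.drop i).take 2 = ['-', '-'] ∧
          (i + 2 = s.length ∨ (s[i + 2]?).any (pvFlagWs.contains ·) = true)) := by
        intro hc
        rw [hnil] at hc
        simp only [List.take_nil] at hc
        exact absurd hc.1 (by simp)
      rw [pvALoop, if_pos hnil, if_neg hc]
    · have hcp : ¬ (PySem.Chars.startswith (s.drop i) ['-', 'p'] = true ∧
          ((s.drop i).length = 2 ∨ (PySem.List.pyGet? (s.drop i) 2).any (pvFlagWs.contains ·) = true)) := by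
        intro hc; exact h ((pvCondIff s i 'p' hi).mp hc)
      by_cases hdd : (s.drop i).take 2 = ['-', '-'] ∧
          (i + 2 = s.length ∨ (s[i + 2]?).any (pvFlagWs.contains ·) = true)
      · have hcd := (pvCondIff s i '-' hi).mpr hdd
        rw [pvALoop, if_neg hnil, if_neg hcp, if_pos hcd, hslice, pvLstripDrop, if_pos hdd]
      · have hcd : ¬ (PySem.Chars.startswith (s.drop i) ['-', '-'] = true ∧
            ((s.drop i).length = 2 ∨ (PySem.List.pyGet? (s.drop i) 2).any (pvFlagWs.contains ·) = true)) := by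
          intro hc; exact hdd ((pvCondIff s i '-' hi).mp hc)
        rw [pvALoop, if_neg hnil, if_neg hcp, if_neg hcd, if_neg hdd]

-- the keyword guards of the two ports agree
theorem pvGuardIff (s : List Char) :
    (¬ PySem.Chars.startswith s ['t', 'i', 'm', 'e'] = false ∧
      ¬ (s.drop 4 ≠ [] ∧ (PySem.List.pyGet? (s.drop 4) 0).any (pvTimeSeps.contains ·) = false))
    ↔ (s.take 4 = ['t', 'i', 'm', 'e'] ∧
      (s.length = 4 ∨ (s[4]?).any (pvTimeSeps.contains ·) = true)) := by
  have hsw : ¬ PySem.Chars.startswith s ['t', 'i', 'm', 'e'] = false ↔ s.take 4 = ['t', 'i', 'm', 'e'] := by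
    rw [Bool.not_eq_false, PySem.Chars.startswith_iff, List.prefix_iff_eq_take]
    simp [eq_comm]
  have hget : PySem.List.pyGet? (s.drop 4) 0 = s[4]? := by
    have h1 := PySem.List.pyGet?_natCast (s.drop 4) 0
    simp only [Nat.cast_zero] at h1
    rw [h1, List.getElem?_drop]
  constructor
  · rintro ⟨h1, h2⟩
    have ht := hsw.mp h1
    have hlen4 : 4 ≤ s.length := by
      have := congrArg List.length ht
      simp only [List.length_take, List.length_cons, List.length_nil] at this
      omega
    refine ⟨ht, ?_⟩
    by_cases hnil : s.drop 4 = []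
    · left
      have := congrArg List.length hnil
      simp only [List.length_drop, List.length_nil] at this
      omega
    · right
      by_cases hb : (PySem.List.pyGet? (s.drop 4) 0).any (pvTimeSeps.contains ·) = false
      · exact absurd ⟨hnil, hb⟩ h2
      · rw [← hget]
        simpa using hb
  · rintro ⟨h1, h2⟩
    refine ⟨hsw.mpr h1, ?_⟩
    rintro ⟨hnil, hb⟩
    rcases h2 with h2 | h2
    · exact hnil (List.drop_eq_nil_of_le (by omega))
    · rw [hget] at hb
      rw [hb] at h2
      exact absurd h2 (by simp)

-- ===== VERDICT (by name: the statement is the Claim_ definition above) =====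
theorem preparse_strip_time_spec : Claim_equal_preparse_strip_time := by
  unfold Claim_equal_preparse_strip_time Spec_preparse_strip_time
  intro cmd _
  simp only [preparse_strip_time, preparse_strip_time_alt]
  set s := PySem.Chars.lstrip cmd.toList with hs
  have ht4 : (4 : Int).toNat = 4 := by decide
  have hslice4 : PySem.List.slice s (some 4) none = s.drop 4 := by
    rw [PySem.List.slice_from _ (by norm_num), ht4]
  rw [hslice4]
  by_cases hg : s.take 4 = ['t', 'i', 'm', 'e'] ∧
      (s.length = 4 ∨ (s[4]?).any (pvTimeSeps.contains ·) = true)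
  · obtain ⟨h1, h2⟩ := (pvGuardIff s).mpr hg
    rw [if_neg h1, if_neg h2, if_pos hg]
    have h4 : 4 ≤ s.length := by
      have := congrArg List.length hg.1
      simp only [List.length_take, List.length_cons, List.length_nil] at this
      omega
    rw [pvLstripDrop s 4,
        pvLoopEq s (pvSkipWs s 4) (le_trans (pvSkipWsGe s 4).2 (by omega))]
  · rw [if_neg hg]
    split_ifs with hsw hsecond
    · rfl
    · rfl
    · exact absurd ((pvGuardIff s).mp ⟨hsw, hsecond⟩) hg
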